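-- pv_equiv track=rewrite | github.com/42ama/HeadhunterRuStats | data/starter.py | pairs_to_lists
-- ===== SOURCE A (Python) =====
-- def pairs_to_lists(list_pairs):
-- 	list_a=[]
-- 	list_b=[]
-- 	list_out1=[]
-- 	list_out2=[]
-- 	for x in list_pairs:
-- 		if(len(x)!=0):
-- 			list_a.append(x[0])
-- 			list_b.append(x[1])
-- 		else:
-- 			list_out1.append(list_a)
-- 			list_out2.append(list_b)
-- 			list_a=[]
-- 			list_b=[]
-- 	return (list_out1, list_out2)
-- ===== SOURCE B (Python) =====
-- def pairs_to_lists(list_pairs):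
--     # pass 1: split into groups of pairs at empty separators (trailing group discarded)
--     groups = []
--     cur = []
--     for x in list_pairs:
--         if len(x) == 0:
--             groups.append(cur)
--             cur = []
--         else:
--             cur.append(x)
--     # pass 2: transpose each group into columns
--     list_out1 = [[p[0] for p in g] for g in groups]
--     list_out2 = [[p[1] for p in g] for g in groups]
--     return (list_out1, list_out2)
-- ===== Notes on version B (the rewrite author's own statement) =====
-- stated objective: alternative
-- what changed: B splits the work into two passes - first group the pairs between empty separators, then transpose each group into its two columns - instead of A's single loop that maintains both column accumulators inline.
import Mathlib
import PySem

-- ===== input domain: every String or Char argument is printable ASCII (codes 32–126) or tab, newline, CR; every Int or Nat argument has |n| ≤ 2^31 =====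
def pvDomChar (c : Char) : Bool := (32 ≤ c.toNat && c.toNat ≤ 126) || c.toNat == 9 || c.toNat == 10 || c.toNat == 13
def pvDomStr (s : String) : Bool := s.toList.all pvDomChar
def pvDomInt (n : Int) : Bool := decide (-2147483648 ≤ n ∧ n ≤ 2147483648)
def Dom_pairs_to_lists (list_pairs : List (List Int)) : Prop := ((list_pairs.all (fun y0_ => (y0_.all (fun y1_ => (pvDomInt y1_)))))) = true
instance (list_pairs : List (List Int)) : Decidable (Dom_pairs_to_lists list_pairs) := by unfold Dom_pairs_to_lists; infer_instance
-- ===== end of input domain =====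

-- ===== PORT A =====
-- A: one loop keeping the two current column accumulators and flushing both on a separator.
def pairsStepA (st : List Int × List Int × List (List Int) × List (List Int)) (x : List Int) :
    List Int × List Int × List (List Int) × List (List Int) :=
  let (la, lb, o1, o2) := st
  if x.length ≠ 0 then
    (la ++ [(PySem.List.pyGet? x 0).getD 0], lb ++ [(PySem.List.pyGet? x 1).getD 0], o1, o2)
  else
    ([], [], o1 ++ [la], o2 ++ [lb])

def pairs_to_lists (list_pairs : List (List Int)) : List (List Int) × List (List Int) :=
  let r := list_pairs.foldl pairsStepA ([], [], [], [])
  (r.2.2.1, r.2.2.2)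

-- ===== PORT B =====
-- B pass 1: group the pairs between empty separators (trailing group discarded).
def groupStepB (st : List (List Int) × List (List (List Int)))
    (x : List Int) : List (List Int) × List (List (List Int)) :=
  let (cur, groups) := st
  if x.length = 0 then ([], groups ++ [cur]) else (cur ++ [x], groups)

-- B pass 2: transpose each group into its two columns.
def pairs_to_lists_alt (list_pairs : List (List Int)) : List (List Int) × List (List Int) :=
  let (_, groups) := list_pairs.foldl groupStepB ([], [])
  (groups.map (fun g => g.map (fun p => (PySem.List.pyGet? p 0).getD 0)),
   groups.map (fun g => g.map (fun p => (PySem.List.pyGet? p 1).getD 0)))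

-- ===== PRECONDITION & SPEC =====
-- Pre_ excludes inputs containing a nonempty pair of length 1, on which Python A raises IndexError (x[1]).
def Pre_pairs_to_lists (list_pairs : List (List Int)) : Prop :=
  ∀ x ∈ list_pairs, x ≠ [] → 2 ≤ x.length
instance (list_pairs : List (List Int)) : Decidable (Pre_pairs_to_lists list_pairs) := by
  unfold Pre_pairs_to_lists; infer_instance
def pvWitness_pairs_to_lists : List (List Int) := [[1, 2], [], [], [3, 4], [5, 6], [], [7, 8]]
def Spec_pairs_to_lists (list_pairs : List (List Int)) (out : List (List Int) × List (List Int)) : Prop := out = pairs_to_lists_alt list_pairs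
instance (list_pairs : List (List Int)) (out : List (List Int) × List (List Int)) : Decidable (Spec_pairs_to_lists list_pairs out) := by unfold Spec_pairs_to_lists; infer_instance

-- ===== CLAIM (what is proved, stated in full; the proofs are below) =====
def Claim_equal_pairs_to_lists : Prop := ∀ (list_pairs : List (List Int)), Dom_pairs_to_lists list_pairs → Pre_pairs_to_lists list_pairs → Spec_pairs_to_lists list_pairs (pairs_to_lists list_pairs)

-- ===== LEMMAS AND PROOFS =====
-- Column projections used to relate B's group of pairs to A's two column accumulators.
def proj0 (p : List Int) : Int := (PySem.List.pyGet? p 0).getD 0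
def proj1 (p : List Int) : Int := (PySem.List.pyGet? p 1).getD 0

-- Invariant: A's fold state is the image of B's fold state under the column projections.
theorem fold_rel (lp : List (List Int)) (cur : List (List Int)) (groups : List (List (List Int))) :
    lp.foldl pairsStepA (cur.map proj0, cur.map proj1,
      groups.map (fun g => g.map proj0), groups.map (fun g => g.map proj1)) =
    (let (c, gs) := lp.foldl groupStepB (cur, groups);
     (c.map proj0, c.map proj1,
      gs.map (fun g => g.map proj0), gs.map (fun g => g.map proj1))) := by
  induction lp generalizing cur groups with
  | nil => simp
  | cons x xs ih =>
    simp only [List.foldl_cons]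
    by_cases hx : x.length = 0
    · have h1 : pairsStepA (cur.map proj0, cur.map proj1,
          groups.map (fun g => g.map proj0), groups.map (fun g => g.map proj1)) x =
          (([] : List (List Int)).map proj0, ([] : List (List Int)).map proj1,
           (groups ++ [cur]).map (fun g => g.map proj0),
           (groups ++ [cur]).map (fun g => g.map proj1)) := by
        simp [pairsStepA, hx]
      have h2 : groupStepB (cur, groups) x = ([], groups ++ [cur]) := by
        simp [groupStepB, hx]
      rw [h1, h2, ih]
    · have h1 : pairsStepA (cur.map proj0, cur.map proj1,
          groups.map (fun g => g.map proj0), groups.map (fun g => g.map proj1)) x =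
          ((cur ++ [x]).map proj0, (cur ++ [x]).map proj1,
           groups.map (fun g => g.map proj0), groups.map (fun g => g.map proj1)) := by
        simp [pairsStepA, hx, proj0, proj1]
      have h2 : groupStepB (cur, groups) x = (cur ++ [x], groups) := by
        simp [groupStepB, hx]
      rw [h1, h2, ih]

-- ===== VERDICT (by name: the statement is the Claim_ definition above) =====
theorem pairs_to_lists_spec : Claim_equal_pairs_to_lists := by
  intro lp _ _
  unfold Spec_pairs_to_lists pairs_to_lists pairs_to_lists_alt
  have h := fold_rel lp [] []
  simp only [List.map_nil] at h
  rw [h]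
  rcases hfold : lp.foldl groupStepB ([], []) with ⟨c, gs⟩
  simp [proj0, proj1]
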